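-- pv_equiv track=rewrite | github.com/Este1le/hpo_nmt | automl2022/starting_kit/scoring_program/eval_multiple.py | fta
-- ===== SOURCE A (Python) =====
-- def fta(sequence, fronts, num_init):
--     '''
--     Measure the runtime to find all points on the Pareto front.
--     :param sequence: A list of sample ids sorted by sampling order.
--     :param fronts: A list of Pareto-optimal sample ids.
--     :param num_init: Number of initial samples.
--     :return: fta runtime.
--     '''
--     runtime = 0
--     for i in range(len(sequence)):
--         runtime += 1
--         if sequence[i] in fronts:
--             fronts = [f for f in fronts if f!=sequence[i]]
--             if len(fronts) == 0:
--                 break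
--     if runtime < num_init:
--         return num_init
--     else:
--         return runtime
-- ===== SOURCE B (Python) =====
-- def fta(sequence, fronts, num_init):
--     # Build-then-reduce: distinct front ids, their first-occurrence positions,
--     # runtime = last first-occurrence + 1 (or len(sequence) if none/missing).
--     distinct = []
--     for f in fronts:
--         if f not in distinct:
--             distinct.append(f)
--     if distinct and all(f in sequence for f in distinct):
--         runtime = max(sequence.index(f) for f in distinct) + 1
--     else:
--         runtime = len(sequence)
--     return max(runtime, num_init)
-- ===== Notes on version B (the rewrite author's own statement) =====
-- stated objective: alternative
-- what changed: A's stateful scan over sequence (rebuilding the shrinking fronts list by a filter at every hit and testing membership in it at every step) is replaced by a build-then-reduce: dedup the front ids once, look up each id's first-occurrence index in sequence, and take max(index)+1 (or len(sequence) if there are no fronts or one is missing), then max with num_init.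
import Mathlib
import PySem

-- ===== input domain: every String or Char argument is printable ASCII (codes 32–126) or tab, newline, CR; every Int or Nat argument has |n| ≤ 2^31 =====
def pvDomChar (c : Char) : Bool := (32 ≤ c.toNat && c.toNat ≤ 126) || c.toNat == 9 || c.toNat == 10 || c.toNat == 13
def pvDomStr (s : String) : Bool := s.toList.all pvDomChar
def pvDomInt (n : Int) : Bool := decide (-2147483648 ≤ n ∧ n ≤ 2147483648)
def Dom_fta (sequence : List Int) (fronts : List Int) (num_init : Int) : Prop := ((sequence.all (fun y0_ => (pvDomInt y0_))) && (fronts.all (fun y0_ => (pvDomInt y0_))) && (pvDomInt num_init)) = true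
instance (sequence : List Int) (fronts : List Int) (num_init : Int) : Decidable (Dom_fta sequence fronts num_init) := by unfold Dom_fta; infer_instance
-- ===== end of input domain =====

-- B replaces A's stateful scan (shrinking `fronts` inside the loop) by a build-then-reduce:
-- distinct front ids, their first-occurrence indices, max + 1; objective: alternative decomposition.

-- ===== PORT A =====
-- the for-loop of A: iterates over sequence, shrinking fronts, counting runtime; early break
def ftaLoop (sequence : List Int) (fronts : List Int) (runtime : Int) : Int :=
  match sequence with
  | [] => runtime
  | x :: rest =>
    let runtime := runtime + 1
    if x ∈ fronts then
      let fronts' := fronts.filter (fun f => f ≠ x)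
      if fronts'.length = 0 then runtime
      else ftaLoop rest fronts' runtime
    else ftaLoop rest fronts runtime

def fta (sequence : List Int) (fronts : List Int) (num_init : Int) : Int :=
  let runtime := ftaLoop sequence fronts 0
  if runtime < num_init then num_init else runtime

-- ===== PORT B =====
-- max of a nonempty list of Nats (Python's max() on the guarded, nonempty generator in Source B)
def maxL : List Nat → Nat
  | [] => 0
  | a :: l => Nat.max a (maxL l)

-- Source B's guarded runtime computation: if every distinct front id occurs, last first-occurrence + 1, else len(sequence)
def ftaRuntime (sequence : List Int) (distinct : List Int) : Int :=
  if distinct ≠ [] ∧ ∀ f ∈ distinct, f ∈ sequence then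
    -- sequence.index(f): index? is some here since the guard checked f ∈ sequence
    (maxL (distinct.map (fun f => (PySem.List.index? sequence f).getD 0)) : Int) + 1
  else (sequence.length : Int)

def fta_alt (sequence : List Int) (fronts : List Int) (num_init : Int) : Int :=
  max (ftaRuntime sequence (PySem.Set.ofList fronts)) num_init

-- ===== PRECONDITION & SPEC =====
def Spec_fta (sequence : List Int) (fronts : List Int) (num_init : Int) (out : Int) : Prop := out = fta_alt sequence fronts num_init
instance (sequence : List Int) (fronts : List Int) (num_init : Int) (out : Int) : Decidable (Spec_fta sequence fronts num_init out) := by unfold Spec_fta; infer_instance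

-- ===== CLAIM (what is proved, stated in full; the proofs are below) =====
def Claim_equal_fta : Prop := ∀ (sequence : List Int) (fronts : List Int) (num_init : Int), Dom_fta sequence fronts num_init → Spec_fta sequence fronts num_init (fta sequence fronts num_init)

-- ===== LEMMAS AND PROOFS =====

-- the Nat-valued runtime B's formula assigns with front list fr
def S (seq fr : List Int) : Nat :=
  if fr ≠ [] ∧ ∀ f ∈ fr, f ∈ seq then
    maxL (fr.map (fun f => (PySem.List.index? seq f).getD 0)) + 1
  else seq.length

theorem le_maxL {a : Nat} {l : List Nat} (h : a ∈ l) : a ≤ maxL l := by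
  induction l with
  | nil => cases h
  | cons b t ih =>
    rcases List.mem_cons.1 h with rfl | h
    · exact Nat.le_max_left _ _
    · exact le_trans (ih h) (Nat.le_max_right _ _)

theorem maxL_le {n : Nat} {l : List Nat} (h : ∀ a ∈ l, a ≤ n) : maxL l ≤ n := by
  induction l with
  | nil => exact Nat.zero_le n
  | cons b t ih =>
    exact Nat.max_le.2 ⟨h b (List.mem_cons_self), ih fun a ha => h a (List.mem_cons_of_mem _ ha)⟩

theorem maxL_mem_congr {l₁ l₂ : List Nat} (h : ∀ a, a ∈ l₁ ↔ a ∈ l₂) : maxL l₁ = maxL l₂ :=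
  Nat.le_antisymm (maxL_le fun a ha => le_maxL ((h a).1 ha))
    (maxL_le fun a ha => le_maxL ((h a).2 ha))

theorem filter_ne_nil_all {x : Int} {l : List Int} (h : l.filter (fun f => f ≠ x) = []) :
    ∀ a ∈ l, a = x := by
  intro a ha
  have := List.filter_eq_nil_iff.mp h a ha
  simpa using this

theorem maxL_map_succ {l : List Int} (g : Int → Nat) (hl : l ≠ []) :
    maxL (l.map (fun a => g a + 1)) = maxL (l.map g) + 1 := by
  induction l with
  | nil => cases hl rfl
  | cons b t ih =>
    cases t with
    | nil => simp [maxL]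
    | cons c u =>
      simp only [List.map_cons, maxL] at ih ⊢
      rw [ih (by simp)]
      exact (Nat.succ_max_succ _ _)

theorem maxL_map_shift (l : List Int) (x : Int) (g : Int → Nat)
    (hne : l.filter (fun f => f ≠ x) ≠ []) :
    maxL (l.map (fun f => if f = x then 0 else g f + 1)) =
      maxL ((l.filter (fun f => f ≠ x)).map g) + 1 := by
  induction l with
  | nil => cases hne rfl
  | cons a t ih =>
    by_cases hax : a = x
    · subst hax
      have hfil : (a :: t).filter (fun f => f ≠ a) = t.filter (fun f => f ≠ a) := by
        simp
      rw [hfil] at hne ⊢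
      simp only [List.map_cons, maxL]
      rw [ih hne]
      simp
    · have hfil : (a :: t).filter (fun f => f ≠ x) = a :: t.filter (fun f => f ≠ x) := by
        simp [hax]
      rw [hfil]
      simp only [List.map_cons, if_neg hax, maxL]
      by_cases ht : t.filter (fun f => f ≠ x) = []
      · rw [ht]
        have hz : maxL (t.map (fun f => if f = x then 0 else g f + 1)) = 0 := by
          apply Nat.le_antisymm _ (Nat.zero_le _)
          apply maxL_le
          intro b hb
          rcases List.mem_map.1 hb with ⟨f, hf, rfl⟩
          have hfx : f = x := filter_ne_nil_all ht f hf
          simp [hfx]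
        rw [hz]
        simp [maxL]
      · rw [ih ht]
        exact (Nat.succ_max_succ _ _)

-- membership facts about fronts' = fronts.filter (· ≠ x)
theorem mem_filter_ne {f x : Int} {l : List Int} :
    f ∈ l.filter (fun f => f ≠ x) ↔ f ∈ l ∧ f ≠ x := by
  simp [List.mem_filter]

-- main loop characterization: A's loop = runtime + S
theorem ftaLoop_eq_S : ∀ (seq fronts : List Int) (rt : Int),
    ftaLoop seq fronts rt = rt + (S seq fronts : Int) := by
  intro seq
  induction seq with
  | nil =>
    intro fronts rt
    have : S [] fronts = 0 := by
      unfold S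
      rw [if_neg]
      · rfl
      · rintro ⟨hne, hall⟩
        rcases List.exists_mem_of_ne_nil fronts hne with ⟨f, hf⟩
        exact absurd (hall f hf) (List.not_mem_nil)
    simp [ftaLoop, this]
  | cons x rest ih =>
    intro fronts rt
    by_cases hx : x ∈ fronts
    · by_cases hlen : (fronts.filter (fun f => f ≠ x)).length = 0
      · -- break: all remaining fronts equal x
        have hfil : fronts.filter (fun f => f ≠ x) = [] := List.length_eq_zero_iff.1 hlen
        have hallx : ∀ a ∈ fronts, a = x := filter_ne_nil_all hfil
        have hSx : S (x :: rest) fronts = 1 := by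
          unfold S
          rw [if_pos]
          · have hz : maxL (fronts.map (fun f => (PySem.List.index? (x :: rest) f).getD 0)) = 0 := by
              apply Nat.le_antisymm _ (Nat.zero_le _)
              apply maxL_le
              intro a ha
              rcases List.mem_map.1 ha with ⟨f, hf, rfl⟩
              rw [hallx f hf, PySem.List.index?_cons_self]
              simp
            rw [hz]
          · refine ⟨List.ne_nil_of_mem hx, fun f hf => ?_⟩
            rw [hallx f hf]
            exact List.mem_cons_self
        simp only [ftaLoop, if_pos hx, if_pos hlen, hSx]
        omega
      · -- recurse with shrunken fronts'
        have hfil : fronts.filter (fun f => f ≠ x) ≠ [] := by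
          intro h
          exact hlen (by rw [h]; rfl)
        have hstep : S (x :: rest) fronts = 1 + S rest (fronts.filter (fun f => f ≠ x)) := by
          unfold S
          by_cases hC : (fronts.filter (fun f => f ≠ x)) ≠ [] ∧
              ∀ f ∈ fronts.filter (fun f => f ≠ x), f ∈ rest
          · rw [if_pos hC]
            rw [if_pos ?_]
            · -- max over fronts of idx(x::rest) = max over fronts' of idx(rest) + 1
              have hcong : fronts.map (fun f => (PySem.List.index? (x :: rest) f).getD 0) =
                  fronts.map (fun f => if f = x then 0 else (PySem.List.index? rest f).getD 0 + 1) := by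
                apply List.map_congr_left
                intro f hf
                by_cases hfx : f = x
                · rw [hfx, PySem.List.index?_cons_self, if_pos rfl]
                  rfl
                · have hfr : f ∈ rest := hC.2 f (mem_filter_ne.2 ⟨hf, hfx⟩)
                  have hxf : x ≠ f := fun h => hfx h.symm
                  rw [PySem.List.index?_cons_of_ne rest hxf, if_neg hfx]
                  rcases Option.isSome_iff_exists.1
                    ((PySem.List.index?_isSome_iff (xs := rest) (v := f)).2 hfr) with ⟨k, hk⟩
                  rw [hk]
                  rfl
              rw [hcong, maxL_map_shift fronts x _ hfil]
              omega
            · refine ⟨List.ne_nil_of_mem hx, fun f hf => ?_⟩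
              by_cases hfx : f = x
              · rw [hfx]; exact List.mem_cons_self
              · exact List.mem_cons_of_mem _ (hC.2 f (mem_filter_ne.2 ⟨hf, hfx⟩))
          · rw [if_neg hC, if_neg ?_]
            · simp only [List.length_cons]
              omega
            · rintro ⟨-, hall⟩
              apply hC
              refine ⟨hfil, fun f hf => ?_⟩
              rcases mem_filter_ne.1 hf with ⟨hfm, hfx⟩
              rcases List.mem_cons.1 (hall f hfm) with rfl | h
              · exact absurd rfl hfx
              · exact h
        simp only [ftaLoop, if_pos hx, if_neg hlen]
        rw [ih, hstep]
        push_cast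
        ring
    · -- x not in fronts
      have hstep : S (x :: rest) fronts = 1 + S rest fronts := by
        unfold S
        by_cases hC : fronts ≠ [] ∧ ∀ f ∈ fronts, f ∈ rest
        · rw [if_pos hC, if_pos ⟨hC.1, fun f hf => List.mem_cons_of_mem _ (hC.2 f hf)⟩]
          have hcong : fronts.map (fun f => (PySem.List.index? (x :: rest) f).getD 0) =
              fronts.map (fun f => (PySem.List.index? rest f).getD 0 + 1) := by
            apply List.map_congr_left
            intro f hf
            have hxf : x ≠ f := fun h => hx (h ▸ hf)
            rw [PySem.List.index?_cons_of_ne rest hxf]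
            rcases Option.isSome_iff_exists.1
              ((PySem.List.index?_isSome_iff (xs := rest) (v := f)).2 (hC.2 f hf)) with ⟨k, hk⟩
            rw [hk]
            rfl
          rw [hcong, maxL_map_succ _ hC.1]
          omega
        · rw [if_neg hC, if_neg ?_]
          · simp only [List.length_cons]
            omega
          · rintro ⟨hne, hall⟩
            apply hC
            refine ⟨hne, fun f hf => ?_⟩
            rcases List.mem_cons.1 (hall f hf) with rfl | h
            · exact absurd hf hx
            · exact h
      simp only [ftaLoop, if_neg hx]
      rw [ih, hstep]
      push_cast
      ring

-- B's runtime equals S of the original fronts: dedup changes neither emptiness, membership nor the max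
theorem S_ofList (seq fronts : List Int) : S seq (PySem.Set.ofList fronts) = S seq fronts := by
  unfold S
  have hmem : ∀ f : Int, f ∈ PySem.Set.ofList fronts ↔ f ∈ fronts :=
    fun f => PySem.Set.mem_ofList fronts f
  by_cases hC : fronts ≠ [] ∧ ∀ f ∈ fronts, f ∈ seq
  · rw [if_pos ?_, if_pos hC]
    · congr 1
      apply maxL_mem_congr
      intro a
      constructor
      · intro ha
        rcases List.mem_map.1 ha with ⟨f, hf, rfl⟩
        exact List.mem_map.2 ⟨f, (hmem f).1 hf, rfl⟩
      · intro ha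
        rcases List.mem_map.1 ha with ⟨f, hf, rfl⟩
        exact List.mem_map.2 ⟨f, (hmem f).2 hf, rfl⟩
    · refine ⟨fun h => ?_, fun f hf => hC.2 f ((hmem f).1 hf)⟩
      rcases List.exists_mem_of_ne_nil fronts hC.1 with ⟨f, hf⟩
      have := (hmem f).2 hf
      rw [h] at this
      exact List.not_mem_nil this
  · rw [if_neg ?_, if_neg hC]
    rintro ⟨hne, hall⟩
    apply hC
    constructor
    · intro h
      rw [h] at hne
      exact hne rfl
    · intro f hf
      exact hall f ((hmem f).2 hf)

theorem ftaRuntime_eq_S (seq fr : List Int) : ftaRuntime seq fr = (S seq fr : Int) := by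
  unfold ftaRuntime S
  split_ifs with h
  · push_cast
    ring
  · rfl

theorem fta_alt_eq_S (seq fronts : List Int) (ni : Int) :
    fta_alt seq fronts ni = max (S seq fronts : Int) ni := by
  unfold fta_alt
  rw [ftaRuntime_eq_S, S_ofList]

-- ===== VERDICT (by name: the statement is the Claim_ definition above) =====
theorem fta_spec : Claim_equal_fta := by
  intro sequence fronts num_init _
  unfold Spec_fta
  rw [fta_alt_eq_S]
  unfold fta
  rw [ftaLoop_eq_S]
  simp only [zero_add]
  omega
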